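-- pv_equiv track=rewrite | github.com/chadfraser/AdventOfCode2018 | 25-FourDimensionalAdventure.py | build_constellation_disjoint_sets
-- ===== SOURCE A (Python) =====
-- def find_manhattan_distance_between_points(point_a, point_b):
--     distance = 0
--     for coord_a, coord_b in zip(point_a, point_b):
--         distance += abs(coord_a - coord_b)
--     return distance
--
-- def build_constellation_disjoint_sets(constellation_coordinates):
--     disjoint_set_dict = {}
--     for coordinate in constellation_coordinates:
--         disjoint_set_dict[coordinate] = {coordinate}
--         for coordinate_to_compare_to in disjoint_set_dict:
--             if find_manhattan_distance_between_points(coordinate, coordinate_to_compare_to) <= 3: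
--                 new_set = disjoint_set_dict[coordinate_to_compare_to].union(disjoint_set_dict[coordinate])
--                 for value in new_set:
--                     disjoint_set_dict[value] = new_set
--     return disjoint_set_dict
-- ===== SOURCE B (Python) =====
-- def find_manhattan_distance_between_points(point_a, point_b):
--     distance = 0
--     for coord_a, coord_b in zip(point_a, point_b):
--         distance += abs(coord_a - coord_b)
--     return distance
--
-- def bucket_of(buckets, point):
--     for bucket in buckets:
--         if point in bucket:
--             return bucket
--     return []
--
-- def build_constellation_disjoint_sets(constellation_coordinates):
--     # Partition merging: the constellations are kept as a bare list of disjoint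
--     # member lists ("buckets") plus the first-occurrence order of the points.
--     # Each new point builds its merged bucket in ONE pass over the previous
--     # points (prepending every bucket it touches), then one filter pass drops
--     # the absorbed buckets; no per-point map is kept and nothing is relabeled.
--     order = []
--     buckets = []
--     for point in constellation_coordinates:
--         if point in order:
--             continue
--         order.append(point)
--         new = [point]
--         for other in order:
--             if find_manhattan_distance_between_points(point, other) <= 3 and other not in new:
--                 new = bucket_of(buckets, other) + new
--         buckets = [b for b in buckets if b[0] not in new] + [new]
--     return {point: set(bucket_of(buckets, point)) for point in order}
-- ===== Notes on version B (the rewrite author's own statement) =====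
-- stated objective: alternative
-- what changed: A maps every point to a shared set and, for each close key, re-unions and rewrites the dict entry of every member; B keeps no per-point map at all: the partition is a bare list of disjoint member lists, each new point builds its merged constellation in one pass over the previous points by prepending each bucket it touches, one filter pass drops the absorbed buckets, and the result dict is assembled once at the end by bucket search.
import Mathlib
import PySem

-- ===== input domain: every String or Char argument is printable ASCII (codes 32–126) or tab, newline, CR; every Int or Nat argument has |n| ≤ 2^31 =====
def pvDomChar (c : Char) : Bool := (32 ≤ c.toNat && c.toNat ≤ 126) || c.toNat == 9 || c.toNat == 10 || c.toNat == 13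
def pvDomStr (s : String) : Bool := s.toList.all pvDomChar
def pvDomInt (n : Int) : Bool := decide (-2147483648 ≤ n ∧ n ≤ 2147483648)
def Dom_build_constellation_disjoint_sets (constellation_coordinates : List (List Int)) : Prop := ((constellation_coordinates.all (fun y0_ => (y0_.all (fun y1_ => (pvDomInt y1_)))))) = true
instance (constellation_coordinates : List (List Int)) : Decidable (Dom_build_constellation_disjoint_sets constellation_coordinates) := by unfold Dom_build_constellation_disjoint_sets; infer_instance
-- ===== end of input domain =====

-- B replaces A's point→shared-set dict (re-union + full-member rewrite per close key) by a
-- bare partition: a list of disjoint member lists, merged by one pass per new point and one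
-- filter pass; the result dict is assembled once at the end.  A's Python raises no exception
-- on any admitted input, so the equivalence is total.

-- ===== PORT A =====
def find_manhattan_distance_between_points (point_a : List Int) (point_b : List Int) : Int :=
  (point_a.zip point_b).foldl (fun distance p => distance + |p.1 - p.2|) 0

-- inner loop body: 'if dist <= 3: new_set = D[k] | D[c]; for value in new_set: D[value] = new_set'
-- (D[k], D[c] are present keys on every reachable state, so 'getD _ []' is exact)
def pvAMerge (coordinate : List Int) (d : PySem.Dict (List Int) (List (List Int)))
    (coordinate_to_compare_to : List Int) : PySem.Dict (List Int) (List (List Int)) :=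
  if find_manhattan_distance_between_points coordinate coordinate_to_compare_to ≤ 3 then
    let new_set := PySem.Set.union (d.getD coordinate_to_compare_to []) (d.getD coordinate [])
    new_set.foldl (fun d' value => d'.insert value new_set) d
  else d

-- one outer iteration; Python iterates the live dict, but the inner loop only overwrites
-- values of existing keys (every element of new_set is a key), so the key list is fixed
def pvAStep (d : PySem.Dict (List Int) (List (List Int))) (coordinate : List Int) :
    PySem.Dict (List Int) (List (List Int)) :=
  let d1 := d.insert coordinate (PySem.Set.ofList [coordinate])
  d1.keys.foldl (pvAMerge coordinate) d1

def build_constellation_disjoint_sets (constellation_coordinates : List (List Int)) :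
    List (List Int × List (List Int)) :=
  (constellation_coordinates.foldl pvAStep PySem.Dict.empty).items

-- ===== PORT B =====
-- 'for bucket in buckets: if point in bucket: return bucket / return []'
def pvBucketOf (buckets : List (List (List Int))) (point : List Int) : List (List Int) :=
  match buckets with
  | [] => []
  | b :: bs => if point ∈ b then b else pvBucketOf bs point

-- 'if dist(point, other) <= 3 and other not in new: new = bucket_of(buckets, other) + new'
def pvBNewStep (buckets : List (List (List Int))) (point : List Int)
    (nw : List (List Int)) (other : List Int) : List (List Int) :=
  if find_manhattan_distance_between_points point other ≤ 3 ∧ other ∉ nw then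
    pvBucketOf buckets other ++ nw
  else nw

-- one outer iteration of B: skip duplicates, build the merged bucket in one pass over
-- 'order', then drop the absorbed buckets ('b[0]' is exact: every bucket is nonempty)
def pvBStep (st : List (List Int) × List (List (List Int))) (point : List Int) :
    List (List Int) × List (List (List Int)) :=
  if point ∈ st.1 then st
  else
    let order := st.1 ++ [point]
    let nw := order.foldl (pvBNewStep st.2 point) [point]
    (order, st.2.filter (fun b => decide (b.headD [] ∉ nw)) ++ [nw])

-- final dict comprehension '{point: set(bucket_of(buckets, point)) for point in order}'
def build_constellation_disjoint_sets_alt (constellation_coordinates : List (List Int)) :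
    List (List Int × List (List Int)) :=
  let st := constellation_coordinates.foldl pvBStep ([], [])
  st.1.map (fun k => (k, PySem.Set.ofList (pvBucketOf st.2 k)))

-- ===== PRECONDITION & SPEC =====
def Spec_build_constellation_disjoint_sets (constellation_coordinates : List (List Int)) (out : List (List Int × List (List Int))) : Prop := out = build_constellation_disjoint_sets_alt constellation_coordinates
instance (constellation_coordinates : List (List Int)) (out : List (List Int × List (List Int))) : Decidable (Spec_build_constellation_disjoint_sets constellation_coordinates out) := by unfold Spec_build_constellation_disjoint_sets; infer_instance

-- ===== CLAIM (what is proved, stated in full; the proofs are below) =====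
def Claim_equal_build_constellation_disjoint_sets : Prop := ∀ (constellation_coordinates : List (List Int)), Dom_build_constellation_disjoint_sets constellation_coordinates → Spec_build_constellation_disjoint_sets constellation_coordinates (build_constellation_disjoint_sets constellation_coordinates)

-- ===== LEMMAS AND PROOFS =====

lemma dist_aux (a : List Int) : ∀ (b : List Int) (acc : Int),
    (a.zip b).foldl (fun d p => d + |p.1 - p.2|) acc = (b.zip a).foldl (fun d p => d + |p.1 - p.2|) acc := by
  induction a with
  | nil => intro b acc; cases b <;> simp
  | cons x a ih =>
    intro b acc; cases b with
    | nil => simp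
    | cons y b => simp only [List.zip_cons_cons, List.foldl_cons]; rw [abs_sub_comm]; exact ih b _

lemma pvDistComm (a b : List Int) :
    find_manhattan_distance_between_points a b = find_manhattan_distance_between_points b a :=
  dist_aux a b 0

lemma getD_of_get? {κ ν : Type} [BEq κ] (d : PySem.Dict κ ν) (k : κ) (v d0 : ν)
    (h : d.get? k = some v) : d.getD k d0 = v := by
  rw [PySem.Dict.getD_eq_get?_getD, h]; rfl

lemma get?_foldl_insert_const {κ ν : Type} [BEq κ] [LawfulBEq κ] [DecidableEq κ]
    (L : List κ) (v : ν) (d : PySem.Dict κ ν) (x : κ) :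
    (L.foldl (fun d y => d.insert y v) d).get? x = if x ∈ L then some v else d.get? x := by
  induction L generalizing d with
  | nil => simp
  | cons y L ih =>
    simp only [List.foldl_cons]; rw [ih]
    by_cases hx : x ∈ L
    · simp [hx]
    · by_cases hxy : x = y <;> simp [hx, hxy, PySem.Dict.get?_insert]

lemma keys_foldl_insert_const {κ ν : Type} [BEq κ] [LawfulBEq κ]
    (L : List κ) (v : ν) (d : PySem.Dict κ ν) :
    (L.foldl (fun d y => d.insert y v) d).keys = PySem.Set.update d.keys L :=
  PySem.Dict.keys_foldl_insert L (fun _ _ => v) d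

lemma update_of_subset {α : Type} [BEq α] [LawfulBEq α] (s : PySem.Set α) (L : List α)
    (h : ∀ x ∈ L, x ∈ s) : PySem.Set.update s L = s := by
  rw [PySem.Set.update_eq_append_filter]
  have : List.filter (fun y => !s.contains y) (PySem.Set.ofList L) = [] := by
    rw [List.filter_eq_nil_iff]
    intro y hy
    have hys : y ∈ s := h y ((PySem.Set.mem_ofList L y).mp hy)
    simp [hys]
  rw [this, List.append_nil]

lemma ofList_of_nodup {α : Type} [BEq α] [LawfulBEq α] (L : List α) (h : L.Nodup) :
    PySem.Set.ofList L = L := by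
  rw [← PySem.Set.update_nil_left, PySem.Set.update_eq_append_of_disjoint _ _ h (by simp)]
  simp

lemma dict_eq_of_get? {κ ν : Type} [BEq κ] [LawfulBEq κ] (d d' : PySem.Dict κ ν)
    (hk : d.keys = d'.keys) (hn : d.keys.Nodup) (h : ∀ k, d.get? k = d'.get? k) : d = d' := by
  apply PySem.Dict.ext
  have hk' : d.items.map Prod.fst = d'.items.map Prod.fst := by
    simpa only [PySem.Dict.keys] using hk
  have hlen : d.items.length = d'.items.length := by
    have := congrArg List.length hk'
    simpa using this
  apply List.ext_getElem hlen
  intro i h1 h2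
  have hfst : (d.items[i]).1 = (d'.items[i]).1 := by
    have h3 : (d.items.map Prod.fst)[i]'(by simpa using h1) =
        (d'.items.map Prod.fst)[i]'(by simpa using h2) := by simp only [hk']
    simpa using h3
  have hm1 : ((d.items[i]).1, (d.items[i]).2) ∈ d.items := by
    simp only [Prod.mk.eta]
    exact d.items.getElem_mem h1
  have hm2 : ((d'.items[i]).1, (d'.items[i]).2) ∈ d'.items := by
    simp only [Prod.mk.eta]
    exact d'.items.getElem_mem h2
  have hn' : d'.keys.Nodup := hk ▸ hn
  have g1 := PySem.Dict.get?_of_mem_items d hm1 hn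
  have g2 := PySem.Dict.get?_of_mem_items d' hm2 hn'
  have hsnd : (d.items[i]).2 = (d'.items[i]).2 := by
    have : some (d.items[i]).2 = some (d'.items[i]).2 := by
      rw [← g1, h, hfst, g2]
    exact Option.some.inj this
  exact Prod.ext_iff.mpr ⟨hfst, hsnd⟩

lemma list_eq_singleton {α : Type} (L : List α) (k : α) (hk : k ∈ L) (hn : L.Nodup)
    (hall : ∀ x ∈ L, x = k) : L = [k] := by
  cases L with
  | nil => cases hk
  | cons x t =>
    have hx : x = k := hall x (by simp)
    subst hx
    cases t with
    | nil => rfl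
    | cons y t =>
      have hy : y = x := hall y (by simp)
      subst hy
      simp at hn

lemma exists_ne_of_ne_singleton {α : Type} (L : List α) (k : α) (hk : k ∈ L) (hn : L.Nodup)
    (hne : L ≠ [k]) : ∃ x ∈ L, x ≠ k := by
  by_contra hc
  refine hne (list_eq_singleton L k hk hn ?_)
  intro x hx
  by_contra hxk
  exact hc ⟨x, hx, hxk⟩

-- pvBucketOf over an append whose first part misses the point
lemma bkOf_append (l1 l2 : List (List (List Int))) (k : List Int)
    (h : ∀ b ∈ l1, k ∉ b) : pvBucketOf (l1 ++ l2) k = pvBucketOf l2 k := by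
  induction l1 with
  | nil => simp
  | cons b l1 ih =>
    have hb : k ∉ b := h b (by simp)
    simp only [List.cons_append, pvBucketOf, if_neg hb]
    exact ih (fun b' hb' => h b' (by simp [hb']))

-- pvBucketOf returns B when some bucket of the first part contains k and all such buckets equal B
lemma bkOf_eq_of_mem (l1 l2 : List (List (List Int))) (k : List Int) (B : List (List Int))
    (hex : ∃ b ∈ l1, k ∈ b) (huniq : ∀ b ∈ l1, k ∈ b → b = B) :
    pvBucketOf (l1 ++ l2) k = B := by
  induction l1 with
  | nil => obtain ⟨b, hb, _⟩ := hex; cases hb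
  | cons b l1 ih =>
    by_cases hkb : k ∈ b
    · simp only [List.cons_append, pvBucketOf, if_pos hkb]
      exact huniq b (by simp) hkb
    · simp only [List.cons_append, pvBucketOf, if_neg hkb]
      obtain ⟨b', hb', hkb'⟩ := hex
      rcases List.mem_cons.mp hb' with h1 | h1
      · exact absurd (h1 ▸ hkb') hkb
      · exact ih ⟨b', h1, hkb'⟩ (fun b'' hb'' hk'' => huniq b'' (by simp [hb'']) hk'')

-- the invariant between outer iterations: D is A's dict, (order, buckets) is B's state
structure pvInv (order : List (List Int))
    (D : PySem.Dict (List Int) (List (List Int)))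
    (buckets : List (List (List Int))) : Prop where
  keys : D.keys = order
  nod : order.Nodup
  val : ∀ k ∈ order, D.get? k = some (pvBucketOf buckets k)
  mem : ∀ x k, k ∈ order →
    (x ∈ pvBucketOf buckets k ↔ x ∈ order ∧ pvBucketOf buckets x = pvBucketOf buckets k)
  nodB : ∀ k ∈ order, (pvBucketOf buckets k).Nodup
  close : ∀ a ∈ order, ∀ b ∈ order,
    find_manhattan_distance_between_points a b ≤ 3 → pvBucketOf buckets a = pvBucketOf buckets b
  nb : ∀ k ∈ order, pvBucketOf buckets k = [k] ∨ ∃ k' ∈ order, k' ≠ k ∧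
    find_manhattan_distance_between_points k k' ≤ 3 ∧ pvBucketOf buckets k' = pvBucketOf buckets k
  cover : ∀ k ∈ order, pvBucketOf buckets k ∈ buckets
  canon : ∀ b ∈ buckets, ∀ k ∈ b, pvBucketOf buckets k = b
  bord : ∀ b ∈ buckets, ∀ k ∈ b, k ∈ order
  bne : ∀ b ∈ buckets, b ≠ []

lemma inv_self_mem (order : List (List Int)) (D : PySem.Dict (List Int) (List (List Int)))
    (buckets : List (List (List Int))) (h : pvInv order D buckets) (k : List Int)
    (hk : k ∈ order) : k ∈ pvBucketOf buckets k :=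
  (h.mem k k hk).mpr ⟨hk, rfl⟩

-- the invariant during one sweep for a NEW point c; p is the processed prefix, A is A's
-- dict state, N is B's partial merged bucket
structure pvMid (c : List Int) (order : List (List Int))
    (buckets : List (List (List Int))) (D : PySem.Dict (List Int) (List (List Int)))
    (p : List (List Int)) (A : PySem.Dict (List Int) (List (List Int)))
    (N : List (List Int)) : Prop where
  keysM : A.keys = order ++ [c]
  getM : ∀ x, A.get? x = if x ∈ N then some N else (D.insert c [c]).get? x
  cmem : c ∈ N
  nodN : N.Nodup
  whole : ∀ x ∈ N, x = c ∨ (x ∈ order ∧ ∀ y ∈ pvBucketOf buckets x, y ∈ N)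
  closeN : ∀ x ∈ N, x = c ∨ ∃ k₀ ∈ pvBucketOf buckets x,
    find_manhattan_distance_between_points c k₀ ≤ 3
  cclose : ∀ k ∈ p, find_manhattan_distance_between_points c k ≤ 3 → k ∈ N

lemma midNsub (c : List Int) (order : List (List Int)) (buckets : List (List (List Int)))
    (D : PySem.Dict (List Int) (List (List Int))) (p : List (List Int))
    (A : PySem.Dict (List Int) (List (List Int))) (N : List (List Int))
    (m : pvMid c order buckets D p A N) : ∀ x ∈ N, x ∈ order ++ [c] := by
  intro x hx
  rcases m.whole x hx with h1 | ⟨h1, _⟩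
  · simp [h1]
  · simp [h1]

lemma mid_step (c : List Int) (order : List (List Int)) (buckets : List (List (List Int)))
    (D : PySem.Dict (List Int) (List (List Int))) (p : List (List Int)) (k₀ : List Int)
    (A : PySem.Dict (List Int) (List (List Int))) (N : List (List Int))
    (h : pvInv order D buckets) (hc : c ∉ order) (hk₀ : k₀ ∈ order ++ [c])
    (m : pvMid c order buckets D p A N) :
    pvMid c order buckets D (p ++ [k₀]) (pvAMerge c A k₀) (pvBNewStep buckets c N k₀) := by
  have hNsub := midNsub c order buckets D p A N m
  have hnod' : (order ++ [c]).Nodup := by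
    simp [List.nodup_append, h.nod]
    intro a ha hab
    exact hc (hab ▸ ha)
  have hAc : A.getD c [] = N := getD_of_get? _ _ _ _ (by rw [m.getM c, if_pos m.cmem])
  by_cases hcl : find_manhattan_distance_between_points c k₀ ≤ 3
  · by_cases hk₀N : k₀ ∈ N
    · -- close key already merged: both sides unchanged
      have hB : pvBNewStep buckets c N k₀ = N := by
        unfold pvBNewStep
        rw [if_neg (by simp [hk₀N])]
      have hA : pvAMerge c A k₀ = A := by
        unfold pvAMerge
        simp only [hcl, if_true]
        have hAk : A.getD k₀ [] = N := getD_of_get? _ _ _ _ (by rw [m.getM k₀, if_pos hk₀N])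
        rw [hAk, hAc]
        have hu : PySem.Set.union N N = N := update_of_subset _ _ (fun x hx => hx)
        rw [hu]
        apply dict_eq_of_get?
        · rw [keys_foldl_insert_const]
          apply update_of_subset
          intro x hx
          rw [m.keysM]
          exact hNsub x hx
        · rw [keys_foldl_insert_const,
            update_of_subset _ _ (by intro x hx; rw [m.keysM]; exact hNsub x hx), m.keysM]
          exact hnod'
        · intro x
          rw [get?_foldl_insert_const]
          by_cases hx : x ∈ N
          · rw [if_pos hx, m.getM x, if_pos hx]
          · rw [if_neg hx]
      rw [hA, hB]
      refine { m with cclose := ?_ }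
      intro k hk hd
      rcases List.mem_append.mp hk with hk | hk
      · exact m.cclose k hk hd
      · have : k = k₀ := by simpa using hk
        subst this; exact hk₀N
    · -- close key in an untouched bucket: absorb that whole bucket
      have hk₀c : k₀ ≠ c := fun he => hk₀N (he ▸ m.cmem)
      have hk₀o : k₀ ∈ order := by
        rcases List.mem_append.mp hk₀ with h1 | h1
        · exact h1
        · exact absurd (by simpa using h1) hk₀c
      have hG := h.cover k₀ hk₀o
      have hself : k₀ ∈ pvBucketOf buckets k₀ := inv_self_mem order D buckets h k₀ hk₀o
      have hdisj : ∀ x ∈ N, x ∉ pvBucketOf buckets k₀ := by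
        intro x hxN hxG
        have h1 := (h.mem x k₀ hk₀o).mp hxG
        rcases m.whole x hxN with h2 | ⟨_, h3⟩
        · exact hc (h2 ▸ h1.1)
        · exact hk₀N (h3 k₀ (h1.2 ▸ hself))
      have hB : pvBNewStep buckets c N k₀ = pvBucketOf buckets k₀ ++ N := by
        unfold pvBNewStep
        rw [if_pos ⟨hcl, hk₀N⟩]
      have hAk : A.getD k₀ [] = pvBucketOf buckets k₀ := by
        rw [PySem.Dict.getD_eq_get?_getD, m.getM k₀, if_neg hk₀N,
          PySem.Dict.get?_insert_of_ne _ _ hk₀c, h.val k₀ hk₀o]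
        rfl
      have hA : pvAMerge c A k₀ = (pvBucketOf buckets k₀ ++ N).foldl
          (fun d' v => d'.insert v (pvBucketOf buckets k₀ ++ N)) A := by
        unfold pvAMerge
        simp only [hcl, if_true]
        rw [hAk, hAc,
          show PySem.Set.union (pvBucketOf buckets k₀) N = pvBucketOf buckets k₀ ++ N from
            PySem.Set.update_eq_append_of_disjoint _ _ m.nodN hdisj]
      rw [hA, hB]
      have hGsub : ∀ x ∈ pvBucketOf buckets k₀, x ∈ order :=
        fun x hx => ((h.mem x k₀ hk₀o).mp hx).1
      have hsub' : ∀ x ∈ pvBucketOf buckets k₀ ++ N, x ∈ order ++ [c] := by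
        intro x hx
        rcases List.mem_append.mp hx with hx | hx
        · exact List.mem_append.mpr (Or.inl (hGsub x hx))
        · exact hNsub x hx
      refine ⟨?_, ?_, ?_, ?_, ?_, ?_, ?_⟩
      · rw [keys_foldl_insert_const,
          update_of_subset _ _ (by intro x hx; rw [m.keysM]; exact hsub' x hx)]
        exact m.keysM
      · intro x
        rw [get?_foldl_insert_const]
        by_cases hx : x ∈ pvBucketOf buckets k₀ ++ N
        · rw [if_pos hx, if_pos hx]
        · have hxN : x ∉ N := fun h1 => hx (List.mem_append.mpr (Or.inr h1))
          rw [if_neg hx, if_neg hx, m.getM x, if_neg hxN]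
      · exact List.mem_append.mpr (Or.inr m.cmem)
      · exact List.Nodup.append (h.nodB k₀ hk₀o) m.nodN (fun a ha ha' => hdisj a ha' ha)
      · intro x hx
        rcases List.mem_append.mp hx with hx | hx
        · refine Or.inr ⟨hGsub x hx, ?_⟩
          intro y hy
          have hBx : pvBucketOf buckets x = pvBucketOf buckets k₀ := ((h.mem x k₀ hk₀o).mp hx).2
          exact List.mem_append.mpr (Or.inl (hBx ▸ hy))
        · rcases m.whole x hx with h1 | ⟨h1, h2⟩
          · exact Or.inl h1
          · exact Or.inr ⟨h1, fun y hy => List.mem_append.mpr (Or.inr (h2 y hy))⟩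
      · intro x hx
        rcases List.mem_append.mp hx with hx | hx
        · have hBx : pvBucketOf buckets x = pvBucketOf buckets k₀ := ((h.mem x k₀ hk₀o).mp hx).2
          exact Or.inr ⟨k₀, hBx ▸ hself, hcl⟩
        · exact m.closeN x hx
      · intro k hk hd
        rcases List.mem_append.mp hk with hk | hk
        · exact List.mem_append.mpr (Or.inr (m.cclose k hk hd))
        · have : k = k₀ := by simpa using hk
          subst this
          exact List.mem_append.mpr (Or.inl hself)
  · -- distance > 3: both sides unchanged
    have hA : pvAMerge c A k₀ = A := by unfold pvAMerge; simp [hcl]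
    have hB : pvBNewStep buckets c N k₀ = N := by
      unfold pvBNewStep
      rw [if_neg (by simp [hcl])]
    rw [hA, hB]
    refine { m with cclose := ?_ }
    intro k hk hd
    rcases List.mem_append.mp hk with hk | hk
    · exact m.cclose k hk hd
    · have : k = k₀ := by simpa using hk
      subst this; exact absurd hd hcl

lemma mid_fold (c : List Int) (order : List (List Int)) (buckets : List (List (List Int)))
    (D : PySem.Dict (List Int) (List (List Int)))
    (h : pvInv order D buckets) (hc : c ∉ order) :
    ∀ (l p : List (List Int)) A N, (∀ k ∈ l, k ∈ order ++ [c]) →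
    pvMid c order buckets D p A N →
    pvMid c order buckets D (p ++ l) (l.foldl (pvAMerge c) A)
      (l.foldl (pvBNewStep buckets c) N) := by
  intro l
  induction l with
  | nil => intro p A N _ m; simpa using m
  | cons k₀ l ih =>
    intro p A N hl m
    have h1 := mid_step c order buckets D p k₀ A N h hc (hl k₀ (by simp)) m
    have h2 := ih (p ++ [k₀]) (pvAMerge c A k₀) (pvBNewStep buckets c N k₀)
      (fun k hk => hl k (by simp [hk])) h1
    simpa using h2

lemma sweep_id (c : List Int) (order : List (List Int))
    (D : PySem.Dict (List Int) (List (List Int))) (buckets : List (List (List Int)))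
    (h : pvInv order D buckets) (hc : c ∈ order) :
    ∀ l : List (List Int), (∀ k ∈ l, k ∈ order) → l.foldl (pvAMerge c) D = D := by
  intro l
  induction l with
  | nil => intro _; simp
  | cons k l ih =>
    intro hl
    have hk : k ∈ order := hl k (by simp)
    have hstep : pvAMerge c D k = D := by
      unfold pvAMerge
      by_cases hcl : find_manhattan_distance_between_points c k ≤ 3
      · simp only [hcl, if_true]
        have hDk : D.getD k [] = pvBucketOf buckets k := getD_of_get? _ _ _ _ (h.val k hk)
        have hDc : D.getD c [] = pvBucketOf buckets c := getD_of_get? _ _ _ _ (h.val c hc)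
        have hMk : pvBucketOf buckets k = pvBucketOf buckets c := (h.close c hc k hk hcl).symm
        rw [hDk, hDc, hMk]
        have hu : PySem.Set.union (pvBucketOf buckets c) (pvBucketOf buckets c)
            = pvBucketOf buckets c := update_of_subset _ _ (fun x hx => hx)
        rw [hu]
        apply dict_eq_of_get?
        · rw [keys_foldl_insert_const]
          apply update_of_subset
          intro x hx
          rw [h.keys]
          exact ((h.mem x c hc).mp hx).1
        · rw [keys_foldl_insert_const, update_of_subset, h.keys]
          · exact h.nod
          · intro x hx
            rw [h.keys]
            exact ((h.mem x c hc).mp hx).1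
        · intro x
          rw [get?_foldl_insert_const]
          by_cases hx : x ∈ pvBucketOf buckets c
          · have h1 := (h.mem x c hc).mp hx
            have hMx : pvBucketOf buckets x = pvBucketOf buckets c := h1.2
            rw [if_pos hx, h.val x h1.1, hMx]
          · rw [if_neg hx]
      · simp [hcl]
    rw [List.foldl_cons, hstep]
    exact ih (fun k' hk' => hl k' (by simp [hk']))

lemma dirty_sweep (c : List Int) (order : List (List Int))
    (D : PySem.Dict (List Int) (List (List Int))) (buckets : List (List (List Int)))
    (h : pvInv order D buckets) (hc : c ∈ order) :
    ∀ l : List (List Int), (∀ k ∈ l, k ∈ order) →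
    l.foldl (pvAMerge c) (D.insert c [c]) =
      if l.any (fun j => decide (find_manhattan_distance_between_points c j ≤ 3) && j ≠ c)
      then D else D.insert c [c] := by
  have hkeys1 : (D.insert c [c]).keys = D.keys :=
    PySem.Dict.keys_insert_of_contains D [c]
      (by rw [PySem.Dict.contains_eq_decide_mem_keys, h.keys]; simpa using hc)
  intro l
  induction l with
  | nil => intro _; simp
  | cons j l ih =>
    intro hl
    have hj : j ∈ order := hl j (by simp)
    have hrest : ∀ k ∈ l, k ∈ order := fun k hk => hl k (by simp [hk])
    by_cases hcl : find_manhattan_distance_between_points c j ≤ 3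
    · by_cases hjc : j = c
      · -- the key c itself: the dirty state is preserved
        subst hjc
        have hstep : pvAMerge j (D.insert j [j]) j = D.insert j [j] := by
          unfold pvAMerge
          simp only [hcl, if_true]
          have hg : (D.insert j [j]).getD j [] = [j] := PySem.Dict.getD_insert_self _ _ _ _
          rw [hg]
          have hu : PySem.Set.union [j] [j] = [j] :=
            update_of_subset _ _ (fun x hx => hx)
          rw [hu]
          simp only [List.foldl_cons, List.foldl_nil]
          apply dict_eq_of_get?
          · rw [PySem.Dict.keys_insert_of_contains _ [j] (PySem.Dict.contains_insert_self _ _ _)]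
          · rw [PySem.Dict.keys_insert_of_contains _ [j] (PySem.Dict.contains_insert_self _ _ _),
              hkeys1, h.keys]
            exact h.nod
          · intro x
            rw [PySem.Dict.get?_insert, PySem.Dict.get?_insert]
            by_cases hx : x = j <;> simp [hx]
        rw [List.foldl_cons, hstep, ih hrest]
        simp
      · -- a close key other than c: the dirty state collapses back to D
        have hrr : pvBucketOf buckets c = pvBucketOf buckets j := h.close c hc j hj hcl
        have hMj : pvBucketOf buckets j = pvBucketOf buckets c := hrr.symm
        have hcM : c ∈ pvBucketOf buckets c := inv_self_mem order D buckets h c hc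
        have hstep : pvAMerge c (D.insert c [c]) j = D := by
          unfold pvAMerge
          simp only [hcl, if_true]
          have hgj : (D.insert c [c]).getD j [] = pvBucketOf buckets c := by
            rw [PySem.Dict.getD_eq_get?_getD, PySem.Dict.get?_insert_of_ne _ _ hjc,
              ← PySem.Dict.getD_eq_get?_getD, getD_of_get? _ _ _ _ (h.val j hj), hMj]
          have hgc : (D.insert c [c]).getD c [] = [c] := PySem.Dict.getD_insert_self _ _ _ _
          rw [hgj, hgc]
          have hu : PySem.Set.union (pvBucketOf buckets c) [c] = pvBucketOf buckets c :=
            update_of_subset _ _ (by intro x hx; simp at hx; subst hx; exact hcM)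
          rw [hu]
          apply dict_eq_of_get?
          · rw [keys_foldl_insert_const, hkeys1]
            apply update_of_subset
            intro x hx
            rw [h.keys]
            exact ((h.mem x c hc).mp hx).1
          · rw [keys_foldl_insert_const, hkeys1]
            rw [update_of_subset _ _ (by intro x hx; rw [h.keys]; exact ((h.mem x c hc).mp hx).1),
              h.keys]
            exact h.nod
          · intro x
            rw [get?_foldl_insert_const]
            by_cases hx : x ∈ pvBucketOf buckets c
            · have h1 := (h.mem x c hc).mp hx
              have hMx : pvBucketOf buckets x = pvBucketOf buckets c := h1.2
              rw [if_pos hx, h.val x h1.1, hMx]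
            · have hxc : x ≠ c := fun he => hx (he ▸ hcM)
              rw [if_neg hx, PySem.Dict.get?_insert_of_ne _ _ hxc]
        rw [List.foldl_cons, hstep, sweep_id c order D buckets h hc l hrest]
        simp [hcl, hjc]
    · have hstep : pvAMerge c (D.insert c [c]) j = D.insert c [c] := by
        unfold pvAMerge; simp [hcl]
      rw [List.foldl_cons, hstep, ih hrest]
      simp [hcl]

lemma headD_mem {α : Type} (l : List α) (d : α) (h : l ≠ []) : l.headD d ∈ l := by
  cases l with
  | nil => exact absurd rfl h
  | cons a t => simp

-- after the full sweep for a new point c, the invariant is restored with the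
-- absorbed buckets dropped and the merged bucket N appended
lemma inv_new (c : List Int) (order : List (List Int)) (buckets : List (List (List Int)))
    (D : PySem.Dict (List Int) (List (List Int)))
    (Afin : PySem.Dict (List Int) (List (List Int))) (N : List (List Int))
    (h : pvInv order D buckets) (hdup : c ∉ order)
    (fin : pvMid c order buckets D (order ++ [c]) Afin N) :
    pvInv (order ++ [c]) Afin
      (buckets.filter (fun b => decide (b.headD [] ∉ N)) ++ [N]) := by
  have hnod' : (order ++ [c]).Nodup := by
    simp [List.nodup_append, h.nod]
    intro a ha hab
    exact hdup (hab ▸ ha)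
  have hNsub := midNsub c order buckets D (order ++ [c]) Afin N fin
  have hself : ∀ k ∈ order, k ∈ pvBucketOf buckets k := inv_self_mem order D buckets h
  have whole' : ∀ x ∈ N, x ≠ c → x ∈ order ∧ ∀ y ∈ pvBucketOf buckets x, y ∈ N := by
    intro x hx hxc
    rcases fin.whole x hx with h1 | h1
    · exact absurd h1 hxc
    · exact h1
  have habs : ∀ b ∈ buckets, ∀ x ∈ b, x ∈ N → ∀ y ∈ b, y ∈ N := by
    intro b hb x hx hxN y hy
    have hxo : x ∈ order := h.bord b hb x hx
    have hxc : x ≠ c := fun he => hdup (he ▸ hxo)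
    have h2 := (whole' x hxN hxc).2
    rw [h.canon b hb x hx] at h2
    exact h2 y hy
  have hmemc : ∀ x, x ∈ order ++ [c] → x ∉ N → x ∈ order := by
    intro x hx hxN
    rcases List.mem_append.mp hx with h1 | h1
    · exact h1
    · exact absurd ((by simpa using h1 : x = c) ▸ fin.cmem) hxN
  have hsurv : ∀ k ∈ order, k ∉ N →
      pvBucketOf buckets k ∈ buckets.filter (fun b => decide (b.headD [] ∉ N)) := by
    intro k hko hkN
    rw [List.mem_filter]
    refine ⟨h.cover k hko, ?_⟩
    simp only [decide_eq_true_eq]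
    intro hhN
    have hne : pvBucketOf buckets k ≠ [] := List.ne_nil_of_mem (hself k hko)
    exact hkN (habs _ (h.cover k hko) _ (headD_mem _ [] hne) hhN k (hself k hko))
  have hbk' : ∀ k ∈ order ++ [c],
      pvBucketOf (buckets.filter (fun b => decide (b.headD [] ∉ N)) ++ [N]) k =
        if k ∈ N then N else pvBucketOf buckets k := by
    intro k hk
    by_cases hkN : k ∈ N
    · rw [if_pos hkN]
      have hnone : ∀ b ∈ buckets.filter (fun b => decide (b.headD [] ∉ N)), k ∉ b := by
        intro b hb hkb
        obtain ⟨hb1, hb2⟩ := List.mem_filter.mp hb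
        have hhead : b.headD [] ∉ N := by simpa using hb2
        exact hhead (habs b hb1 k hkb hkN _ (headD_mem _ [] (h.bne b hb1)))
      rw [bkOf_append _ _ _ hnone]
      simp [pvBucketOf, hkN]
    · rw [if_neg hkN]
      have hko : k ∈ order := hmemc k hk hkN
      refine bkOf_eq_of_mem _ _ _ _ ⟨_, hsurv k hko hkN, hself k hko⟩ ?_
      intro b hb hkb
      exact (h.canon b (List.mem_filter.mp hb).1 k hkb).symm
  have hNc : ∀ a ∈ order ++ [c], ∀ b ∈ order ++ [c],
      find_manhattan_distance_between_points a b ≤ 3 → a ∈ N → b ∈ N := by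
    intro a ha b hb hd haN
    by_cases hac : a = c
    · exact fin.cclose b hb (hac ▸ hd)
    · have hao : a ∈ order := by
        rcases List.mem_append.mp ha with h1 | h1
        · exact h1
        · exact absurd (by simpa using h1) hac
      by_cases hbc : b = c
      · exact hbc ▸ fin.cmem
      · have hbo : b ∈ order := by
          rcases List.mem_append.mp hb with h1 | h1
          · exact h1
          · exact absurd (by simpa using h1) hbc
        exact (whole' a haN hac).2 b (by rw [h.close a hao b hbo hd]; exact hself b hbo)
  refine ⟨fin.keysM, hnod', ?_, ?_, ?_, ?_, ?_, ?_, ?_, ?_, ?_⟩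
  · -- val
    intro k hk
    rw [fin.getM k, hbk' k hk]
    by_cases hkN : k ∈ N
    · rw [if_pos hkN, if_pos hkN]
    · have hko : k ∈ order := hmemc k hk hkN
      have hkc : k ≠ c := fun he => hdup (he ▸ hko)
      rw [if_neg hkN, if_neg hkN, PySem.Dict.get?_insert_of_ne _ _ hkc, h.val k hko]
  · -- mem
    intro x k hk
    rw [hbk' k hk]
    by_cases hkN : k ∈ N
    · rw [if_pos hkN]
      constructor
      · intro hx
        refine ⟨hNsub x hx, ?_⟩
        rw [hbk' x (hNsub x hx), if_pos hx]
      · rintro ⟨hxo, hbx⟩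
        by_cases hxN : x ∈ N
        · exact hxN
        · rw [hbk' x hxo, if_neg hxN] at hbx
          have hxo' : x ∈ order := hmemc x hxo hxN
          have hcbk : c ∈ pvBucketOf buckets x := hbx ▸ fin.cmem
          exact absurd (((h.mem c x hxo').mp hcbk).1) hdup
    · rw [if_neg hkN]
      have hko : k ∈ order := hmemc k hk hkN
      constructor
      · intro hx
        have h1 := (h.mem x k hko).mp hx
        have hxN : x ∉ N := by
          intro hxN
          have hxc : x ≠ c := fun he => hdup (he ▸ h1.1)
          exact hkN ((whole' x hxN hxc).2 k (by rw [h1.2]; exact hself k hko))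
        refine ⟨List.mem_append.mpr (Or.inl h1.1), ?_⟩
        rw [hbk' x (List.mem_append.mpr (Or.inl h1.1)), if_neg hxN]
        exact h1.2
      · rintro ⟨hxo, hbx⟩
        rw [hbk' x hxo] at hbx
        by_cases hxN : x ∈ N
        · rw [if_pos hxN] at hbx
          exact absurd (hbx ▸ hself k hko) hkN
        · rw [if_neg hxN] at hbx
          have hxo' : x ∈ order := hmemc x hxo hxN
          exact (h.mem x k hko).mpr ⟨hxo', hbx⟩
  · -- nodB
    intro k hk
    rw [hbk' k hk]
    by_cases hkN : k ∈ N
    · rw [if_pos hkN]; exact fin.nodN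
    · rw [if_neg hkN]; exact h.nodB k (hmemc k hk hkN)
  · -- close
    intro a ha b hb hd
    rw [hbk' a ha, hbk' b hb]
    by_cases haN : a ∈ N
    · rw [if_pos haN, if_pos (hNc a ha b hb hd haN)]
    · have hbN : b ∉ N := fun hbN =>
        haN (hNc b hb a ha (by rw [pvDistComm]; exact hd) hbN)
      rw [if_neg haN, if_neg hbN]
      exact h.close a (hmemc a ha haN) b (hmemc b hb hbN) hd
  · -- nb
    intro k hk
    rw [hbk' k hk]
    by_cases hkN : k ∈ N
    · rw [if_pos hkN]
      by_cases hsing : N = [k]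
      · exact Or.inl hsing
      right
      by_cases hkc : k = c
      · subst hkc
        obtain ⟨x, hxN, hxc⟩ := exists_ne_of_ne_singleton N k fin.cmem fin.nodN hsing
        rcases fin.closeN x hxN with h1 | ⟨k₀, hk₀b, hd₀⟩
        · exact absurd h1 hxc
        have hxo : x ∈ order := (whole' x hxN hxc).1
        have hk₀N : k₀ ∈ N := (whole' x hxN hxc).2 k₀ hk₀b
        have hk₀o : k₀ ∈ order := ((h.mem k₀ x hxo).mp hk₀b).1
        have hk₀c : k₀ ≠ k := fun he => hdup (he ▸ hk₀o)
        refine ⟨k₀, List.mem_append.mpr (Or.inl hk₀o), hk₀c, hd₀, ?_⟩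
        rw [hbk' k₀ (List.mem_append.mpr (Or.inl hk₀o)), if_pos hk₀N]
      · have hko : k ∈ order := by
          rcases List.mem_append.mp hk with h1 | h1
          · exact h1
          · exact absurd (by simpa using h1) hkc
        rcases h.nb k hko with hsg | ⟨k', hk'o, hne, hdk, hbk⟩
        · rcases fin.closeN k hkN with h1 | ⟨k₀, hk₀b, hd₀⟩
          · exact absurd h1 hkc
          have hk₀k : k₀ = k := by
            rw [hsg] at hk₀b; simpa using hk₀b
          refine ⟨c, by simp, fun he => hkc he.symm, ?_, ?_⟩
          · rw [pvDistComm]; exact hk₀k ▸ hd₀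
          · rw [hbk' c (by simp), if_pos fin.cmem]
        · have hk'N : k' ∈ N := (whole' k hkN hkc).2 k' (by rw [← hbk]; exact hself k' hk'o)
          refine ⟨k', List.mem_append.mpr (Or.inl hk'o), hne, hdk, ?_⟩
          rw [hbk' k' (List.mem_append.mpr (Or.inl hk'o)), if_pos hk'N]
    · rw [if_neg hkN]
      have hko : k ∈ order := hmemc k hk hkN
      rcases h.nb k hko with hsg | ⟨k', hk'o, hne, hdk, hbk⟩
      · exact Or.inl hsg
      · right
        have hk'c : k' ≠ c := fun he => hdup (he ▸ hk'o)
        have hk'N : k' ∉ N := by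
          intro hk'N
          exact hkN ((whole' k' hk'N hk'c).2 k (by rw [hbk]; exact hself k hko))
        refine ⟨k', List.mem_append.mpr (Or.inl hk'o), hne, hdk, ?_⟩
        rw [hbk' k' (List.mem_append.mpr (Or.inl hk'o)), if_neg hk'N]
        exact hbk
  · -- cover
    intro k hk
    rw [hbk' k hk]
    by_cases hkN : k ∈ N
    · rw [if_pos hkN]; exact List.mem_append.mpr (Or.inr (by simp))
    · rw [if_neg hkN]
      exact List.mem_append.mpr (Or.inl (hsurv k (hmemc k hk hkN) hkN))
  · -- canon
    intro b hb k hkb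
    rcases List.mem_append.mp hb with hbf | hbN
    · obtain ⟨hb1, hb2⟩ := List.mem_filter.mp hbf
      have hko : k ∈ order := h.bord b hb1 k hkb
      have hkN : k ∉ N := by
        intro hkN
        have hhead : b.headD [] ∉ N := by simpa using hb2
        exact hhead (habs b hb1 k hkb hkN _ (headD_mem _ [] (h.bne b hb1)))
      rw [hbk' k (List.mem_append.mpr (Or.inl hko)), if_neg hkN]
      exact h.canon b hb1 k hkb
    · have hbN' : b = N := by simpa using hbN
      subst hbN'
      rw [hbk' k (hNsub k hkb), if_pos hkb]
  · -- bord
    intro b hb k hkb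
    rcases List.mem_append.mp hb with hbf | hbN
    · exact List.mem_append.mpr (Or.inl (h.bord b (List.mem_filter.mp hbf).1 k hkb))
    · have hbN' : b = N := by simpa using hbN
      exact hNsub k (hbN' ▸ hkb)
  · -- bne
    intro b hb
    rcases List.mem_append.mp hb with hbf | hbN
    · exact h.bne b (List.mem_filter.mp hbf).1
    · have hbN' : b = N := by simpa using hbN
      exact hbN' ▸ List.ne_nil_of_mem fin.cmem

lemma outer_step (order : List (List Int)) (D : PySem.Dict (List Int) (List (List Int)))
    (buckets : List (List (List Int))) (c : List Int)
    (h : pvInv order D buckets) :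
    pvInv (pvBStep (order, buckets) c).1 (pvAStep D c) (pvBStep (order, buckets) c).2 := by
  by_cases hdup : c ∈ order
  · -- duplicate point: both sides are unchanged
    have hB : pvBStep (order, buckets) c = (order, buckets) := by
      unfold pvBStep
      rw [if_pos hdup]
    have hcontD : D.contains c = true := by
      rw [PySem.Dict.contains_eq_decide_mem_keys, h.keys]; simpa using hdup
    have hkeys1 : (D.insert c [c]).keys = D.keys :=
      PySem.Dict.keys_insert_of_contains D [c] hcontD
    have hA : pvAStep D c = D := by
      show (D.insert c (PySem.Set.ofList [c])).keys.foldl (pvAMerge c)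
        (D.insert c (PySem.Set.ofList [c])) = D
      rw [show PySem.Set.ofList [c] = [c] from rfl, hkeys1, h.keys]
      by_cases hM : pvBucketOf buckets c = [c]
      · have hins : D.insert c [c] = D := by
          apply dict_eq_of_get?
          · exact hkeys1
          · rw [hkeys1, h.keys]; exact h.nod
          · intro x
            rw [PySem.Dict.get?_insert]
            by_cases hx : x = c
            · subst hx; rw [if_pos rfl, h.val x hdup, hM]
            · rw [if_neg hx]
        rw [hins]
        exact sweep_id c order D buckets h hdup order (fun k hk => hk)
      · rcases h.nb c hdup with h1 | ⟨k', hk', hne, hdk, hrk⟩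
        · exact absurd h1 hM
        rw [dirty_sweep c order D buckets h hdup order (fun k hk => hk)]
        have hany : order.any
            (fun j => decide (find_manhattan_distance_between_points c j ≤ 3) && j ≠ c) = true := by
          rw [List.any_eq_true]
          exact ⟨k', hk', by simp [hdk, hne]⟩
        rw [if_pos hany]
    rw [hA, hB]
    exact h
  · -- genuinely new point
    have hcontD : D.contains c = false := by
      rw [PySem.Dict.contains_eq_decide_mem_keys, h.keys]; simpa using hdup
    have hA : pvAStep D c = (order ++ [c]).foldl (pvAMerge c) (D.insert c [c]) := by
      show (D.insert c (PySem.Set.ofList [c])).keys.foldl (pvAMerge c)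
        (D.insert c (PySem.Set.ofList [c])) = _
      rw [show PySem.Set.ofList [c] = [c] from rfl,
        PySem.Dict.keys_insert_of_not_contains D [c] hcontD, h.keys]
    have hB : pvBStep (order, buckets) c =
        (order ++ [c],
         buckets.filter
             (fun b => decide (b.headD [] ∉ (order ++ [c]).foldl (pvBNewStep buckets c) [c])) ++
           [(order ++ [c]).foldl (pvBNewStep buckets c) [c]]) := by
      unfold pvBStep
      rw [if_neg hdup]
    rw [hA, hB]
    have mid0 : pvMid c order buckets D [] (D.insert c [c]) [c] := by
      refine ⟨?_, ?_, by simp, by simp, ?_, ?_, by simp⟩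
      · rw [PySem.Dict.keys_insert_of_not_contains D [c] hcontD, h.keys]
      · intro x
        by_cases hx : x = c
        · subst hx
          rw [if_pos (by simp), PySem.Dict.get?_insert, if_pos rfl]
        · rw [if_neg (by simp [hx])]
      · intro x hx
        exact Or.inl (by simpa using hx)
      · intro x hx
        exact Or.inl (by simpa using hx)
    have fin : pvMid c order buckets D (order ++ [c])
        ((order ++ [c]).foldl (pvAMerge c) (D.insert c [c]))
        ((order ++ [c]).foldl (pvBNewStep buckets c) [c]) := by
      have := mid_fold c order buckets D h hdup (order ++ [c]) [] (D.insert c [c]) [c]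
        (fun k hk => hk) mid0
      simpa only [List.nil_append] using this
    exact inv_new c order buckets D _ _ h hdup fin

lemma good_fold : ∀ (cs : List (List Int)) order D buckets,
    pvInv order D buckets →
    pvInv ((cs.foldl pvBStep (order, buckets)).1) (cs.foldl pvAStep D)
      ((cs.foldl pvBStep (order, buckets)).2) := by
  intro cs
  induction cs with
  | nil => intro order D buckets h; simpa using h
  | cons c cs ih =>
    intro order D buckets h
    have h1 := outer_step order D buckets c h
    have h2 := ih (pvBStep (order, buckets) c).1 (pvAStep D c) (pvBStep (order, buckets) c).2 h1
    simpa using h2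

lemma inv_empty : pvInv [] PySem.Dict.empty [] := by
  constructor <;> simp [PySem.Dict.keys_empty, PySem.Dict.get?_empty]

lemma inv_items (order : List (List Int)) (D : PySem.Dict (List Int) (List (List Int)))
    (buckets : List (List (List Int))) (h : pvInv order D buckets) :
    D.items = order.map (fun k => (k, PySem.Set.ofList (pvBucketOf buckets k))) := by
  have hk' : D.items.map Prod.fst = order := by
    simpa only [PySem.Dict.keys] using h.keys
  have hnodk : D.keys.Nodup := by rw [h.keys]; exact h.nod
  have hlen : D.items.length = order.length := by
    have := congrArg List.length hk'
    simpa using this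
  apply List.ext_getElem (by simpa using hlen)
  intro i h1 h2
  have h2' : i < order.length := by simpa using h2
  have hfst : (D.items[i]).1 = order[i]'h2' := by
    have h3 : (D.items.map Prod.fst)[i]'(by simpa using h1) = order[i]'h2' := by
      simp only [hk']
    simpa using h3
  have hmemo : order[i]'h2' ∈ order := order.getElem_mem h2'
  have hval := h.val (order[i]'h2') hmemo
  have hmi : ((D.items[i]).1, (D.items[i]).2) ∈ D.items := by
    simp only [Prod.mk.eta]
    exact D.items.getElem_mem h1
  have g1 := PySem.Dict.get?_of_mem_items D hmi hnodk
  rw [hfst] at g1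
  have hsnd : (D.items[i]).2 = pvBucketOf buckets (order[i]'h2') :=
    Option.some.inj (g1.symm.trans hval)
  rw [List.getElem_map]
  refine Prod.ext_iff.mpr ⟨hfst, ?_⟩
  rw [hsnd, ofList_of_nodup _ (h.nodB _ hmemo)]

-- ===== VERDICT (by name: the statement is the Claim_ definition above) =====
theorem build_constellation_disjoint_sets_spec : Claim_equal_build_constellation_disjoint_sets := by
  intro cs _
  have hinv := good_fold cs [] PySem.Dict.empty [] inv_empty
  show build_constellation_disjoint_sets cs = build_constellation_disjoint_sets_alt cs
  unfold build_constellation_disjoint_sets build_constellation_disjoint_sets_alt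
  exact inv_items _ _ _ hinv
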